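-- pv_equiv track=rewrite | github.com/YacineCC/UNI | L2/Salah/I33/TP6/exam6.py | combinaison_lineaire
-- ===== SOURCE A (Python) =====
-- def combinaison_lineaire(c,V,p):
--     L =[0]*len(V[0])
--     coef =0
--
--     for v in V :
--         i = 0
--         for el in v :
--             el = (el * c[coef])%p
--             L[i] = (L[i] + el)%p
--             i += 1
--         coef += 1
--
--     return L
-- ===== SOURCE B (Python) =====
-- def combinaison_lineaire(c, V, p):
--     # column-major: each output component is one independent sum over the vectors
--     return [sum(ck * v[i] for ck, v in zip(c, V)) % p for i in range(len(V[0]))]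
-- ===== Notes on version B (the rewrite author's own statement) =====
-- stated objective: simpler
-- what changed: Replaces the row-by-row accumulation into a mutated list (with a running mod at every step) by a column-major list comprehension: each output component is one independent sum over the vectors with a single final mod; Pre_ excludes non-rectangular V (A silently skips entries of short rows, B's column indexing raises there) and c shorter than V (A raises unless all rows are empty, a degenerate case where it returns []).
-- outside the precondition, e.g. on combinaison_lineaire([1, 1], [[1], []], 5): A returns [1], B raises IndexError; on combinaison_lineaire([], [[], []], 5): A returns [], B returns []
import Mathlib
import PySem

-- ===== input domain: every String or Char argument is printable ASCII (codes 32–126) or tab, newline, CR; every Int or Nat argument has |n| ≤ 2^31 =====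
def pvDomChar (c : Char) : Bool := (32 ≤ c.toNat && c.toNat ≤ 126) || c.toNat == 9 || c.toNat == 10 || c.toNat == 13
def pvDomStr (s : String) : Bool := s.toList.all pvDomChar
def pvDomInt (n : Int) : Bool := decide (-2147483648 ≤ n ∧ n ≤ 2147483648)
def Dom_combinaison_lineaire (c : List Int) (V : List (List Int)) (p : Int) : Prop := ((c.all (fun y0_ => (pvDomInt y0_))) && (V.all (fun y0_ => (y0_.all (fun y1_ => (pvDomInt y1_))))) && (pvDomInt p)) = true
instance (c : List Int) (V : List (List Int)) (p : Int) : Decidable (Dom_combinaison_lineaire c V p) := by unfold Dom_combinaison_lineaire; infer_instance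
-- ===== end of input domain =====

-- B replaces A's row-by-row accumulation into a mutated list by a column-major
-- comprehension (one independent sum per output component, single final mod): simpler.


-- ===== PORT A =====
-- literal transliteration of A; c[coef] / L[i] are in range under Pre_, so getD/set are exact there
def combinaison_lineaire (c : List Int) (V : List (List Int)) (p : Int) : List Int :=
  let L0 : List Int := List.replicate (V.headD []).length 0   -- L = [0]*len(V[0]); V ≠ [] under Pre_
  (V.foldl (fun (st : List Int × Nat) v =>
      let inner := v.foldl (fun (st2 : List Int × Nat) el =>
          let e := PySem.Int.mod (el * c.getD st.2 0) p        -- el = (el * c[coef]) % p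
          (st2.1.set st2.2 (PySem.Int.mod (st2.1.getD st2.2 0 + e) p), st2.2 + 1))  -- L[i] = (L[i]+el)%p ; i += 1
        (st.1, 0)
      (inner.1, st.2 + 1))                                     -- coef += 1
    (L0, 0)).1

-- ===== PORT B =====
-- v.getD i 0 is exact for v[i] since Pre_ makes V rectangular and i < len(V[0])
def combinaison_lineaire_alt (c : List Int) (V : List (List Int)) (p : Int) : List Int :=
  (List.range (V.headD []).length).map (fun i =>
    PySem.Int.mod ((c.zip V).foldl (fun acc kv => acc + kv.1 * kv.2.getD i 0) 0) p)

-- ===== PRECONDITION & SPEC =====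
-- Pre_ excludes the inputs where A raises — empty V (V[0] IndexError), p = 0
-- (ZeroDivisionError), c shorter than V (c[coef] IndexError), a row longer than V[0]
-- (L[i] IndexError) — and two corners excluded more widely than A's raises (cited):
-- rows shorter than V[0], where A silently skips the missing entries (an accident of its
-- index bookkeeping) while B's column indexing raises, and c shorter than V with all rows
-- empty, where A never reads c and returns [] (degenerate; B returns [] too).
def Pre_combinaison_lineaire (c : List Int) (V : List (List Int)) (p : Int) : Prop :=
  V ≠ [] ∧ p ≠ 0 ∧ V.length ≤ c.length ∧ ∀ v ∈ V, v.length = (V.headD []).length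
instance (c : List Int) (V : List (List Int)) (p : Int) : Decidable (Pre_combinaison_lineaire c V p) := by unfold Pre_combinaison_lineaire; infer_instance
def pvWitness_combinaison_lineaire : List Int × List (List Int) × Int := ([2, 3], [[1, 2], [3, 4]], 5)

def Spec_combinaison_lineaire (c : List Int) (V : List (List Int)) (p : Int) (out : List Int) : Prop := out = combinaison_lineaire_alt c V p
instance (c : List Int) (V : List (List Int)) (p : Int) (out : List Int) : Decidable (Spec_combinaison_lineaire c V p out) := by unfold Spec_combinaison_lineaire; infer_instance

-- ===== CLAIM (what is proved, stated in full; the proofs are below) =====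
def Claim_equal_combinaison_lineaire : Prop := ∀ (c : List Int) (V : List (List Int)) (p : Int), Dom_combinaison_lineaire c V p → Pre_combinaison_lineaire c V p → Spec_combinaison_lineaire c V p (combinaison_lineaire c V p)

-- ===== LEMMAS AND PROOFS =====

-- the column sum at index i, as a structural recursion on both lists (guarded so it also
-- describes A's partial rows inside the induction)
def pvZipSum (cs : List Int) (Vs : List (List Int)) (i : Nat) : Int :=
  match cs, Vs with
  | ck :: ct, v :: t => (if i < v.length then ck * v.getD i 0 else 0) + pvZipSum ct t i
  | _, _ => 0

-- B's fold equals acc + pvZipSum when column i exists in every row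
lemma pvZipSum_fold (cs : List Int) (Vs : List (List Int)) (i : Nat) (acc : Int)
    (h : ∀ v ∈ Vs, i < v.length) :
    (cs.zip Vs).foldl (fun acc kv => acc + kv.1 * kv.2.getD i 0) acc
      = acc + pvZipSum cs Vs i := by
  induction cs generalizing Vs acc with
  | nil => simp [pvZipSum]
  | cons ck ct ih =>
    cases Vs with
    | nil => simp [pvZipSum]
    | cons v t =>
      simp only [List.zip_cons_cons, List.foldl_cons]
      rw [ih t _ (fun w hw => h w (by simp [hw]))]
      simp only [pvZipSum, if_pos (h v (by simp))]
      ring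

-- A's inner loop over one vector v with fixed coefficient ck, starting at index j
lemma pvInner (p ck : Int) (v : List Int) (L : List Int) (j : Nat)
    (hlen : j + v.length ≤ L.length) :
    (v.foldl (fun (st2 : List Int × Nat) el =>
        (st2.1.set st2.2 (PySem.Int.mod (st2.1.getD st2.2 0 + PySem.Int.mod (el * ck) p) p),
         st2.2 + 1)) (L, j))
      = (L.mapIdx (fun i x =>
            if j ≤ i ∧ i < j + v.length
            then PySem.Int.mod (x + PySem.Int.mod (v.getD (i - j) 0 * ck) p) p
            else x),
         j + v.length) := by
  induction v generalizing L j with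
  | nil =>
    simp only [List.foldl_nil, List.length_nil, Nat.add_zero]
    refine Prod.ext ?_ rfl
    apply List.ext_getElem (by simp)
    intro i h1 h2
    simp
  | cons el tl ih =>
    simp only [List.foldl_cons]
    rw [ih _ (j + 1) (by simp at hlen ⊢; omega)]
    refine Prod.ext ?_ (by simp; omega)
    apply List.ext_getElem (by simp)
    intro i h1 h2
    simp only [List.getElem_mapIdx, List.getElem_set]
    by_cases hij : j = i
    · subst hij
      have hjL : j < L.length := by simp at hlen; omega
      simp [show ¬ (j + 1 ≤ j) by omega, List.getElem?_eq_getElem hjL]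
    · have h1' : i < L.length := by simpa using h1
      simp only [if_neg hij]
      by_cases hr : j + 1 ≤ i ∧ i < j + 1 + tl.length
      · have hr2 : j ≤ i ∧ i < j + (el :: tl).length := by simp; omega
        simp only [if_pos hr, if_pos hr2]
        have he : i - j = (i - (j + 1)) + 1 := by omega
        simp [he, List.getD_eq_getElem?_getD]
      · simp only [List.length_cons]
        rw [if_neg (by simp at hr; omega), if_neg (by simp at hr; omega)]

-- A's outer loop: invariant L.getD i 0 = mod (g i) p turns each step into a pvZipSum step
lemma pvOuter (p : Int) (c : List Int) (Vs : List (List Int)) (L : List Int) (m : Nat)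
    (hc : m + Vs.length ≤ c.length)
    (hv : ∀ v ∈ Vs, v.length ≤ L.length)
    (g : Nat → Int)
    (hg : ∀ i < L.length, L.getD i 0 = PySem.Int.mod (g i) p) :
    (Vs.foldl (fun (st : List Int × Nat) v =>
        let inner := v.foldl (fun (st2 : List Int × Nat) el =>
            let e := PySem.Int.mod (el * c.getD st.2 0) p
            (st2.1.set st2.2 (PySem.Int.mod (st2.1.getD st2.2 0 + e) p), st2.2 + 1))
          (st.1, 0)
        (inner.1, st.2 + 1)) (L, m)).1.length = L.length ∧
    ∀ i < L.length,
      (Vs.foldl (fun (st : List Int × Nat) v =>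
        let inner := v.foldl (fun (st2 : List Int × Nat) el =>
            let e := PySem.Int.mod (el * c.getD st.2 0) p
            (st2.1.set st2.2 (PySem.Int.mod (st2.1.getD st2.2 0 + e) p), st2.2 + 1))
          (st.1, 0)
        (inner.1, st.2 + 1)) (L, m)).1.getD i 0
        = PySem.Int.mod (g i + pvZipSum (c.drop m) Vs i) p := by
  induction Vs generalizing L m g with
  | nil =>
    refine ⟨rfl, ?_⟩
    intro i hi
    simpa [pvZipSum] using hg i hi
  | cons v t ih =>
    simp only [List.foldl_cons]
    rw [pvInner p (c.getD m 0) v L 0 (by simpa using hv v (by simp))]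
    have hm : m < c.length := by simp at hc; omega
    have hdrop : c.drop m = c.getD m 0 :: c.drop (m + 1) := by
      rw [List.getD_eq_getElem _ _ hm, List.drop_eq_getElem_cons hm]
    have hL' : ∀ i < L.length,
        (L.mapIdx (fun i x =>
            if 0 ≤ i ∧ i < 0 + v.length
            then PySem.Int.mod (x + PySem.Int.mod (v.getD (i - 0) 0 * (c.getD m 0)) p) p
            else x)).getD i 0
          = PySem.Int.mod (g i + (if i < v.length then c.getD m 0 * v.getD i 0 else 0)) p := by
      intro i hi
      rw [List.getD_eq_getElem _ _ (by simpa using hi), List.getElem_mapIdx]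
      by_cases hiv : i < v.length
      · simp only [Nat.zero_le, hiv, Nat.zero_add, and_self, if_pos, Nat.sub_zero]
        rw [← List.getD_eq_getElem _ _ hi, hg i hi]
        show (((g i).fmod p) + ((v.getD i 0 * c.getD m 0).fmod p)).fmod p = _
        rw [← Int.add_fmod]
        ring_nf
        rfl
      · simp only [hiv, Nat.zero_add, and_false, if_neg, not_false_iff]
        rw [← List.getD_eq_getElem _ _ hi, hg i hi]
        simp
    have := ih (L.mapIdx (fun i x =>
            if 0 ≤ i ∧ i < 0 + v.length
            then PySem.Int.mod (x + PySem.Int.mod (v.getD (i - 0) 0 * (c.getD m 0)) p) p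
            else x)) (m + 1) (by simp at hc ⊢; omega)
      (by intro w hw; rw [List.length_mapIdx]; exact hv w (by simp [hw]))
      (fun i => g i + (if i < v.length then c.getD m 0 * v.getD i 0 else 0))
      (by rw [List.length_mapIdx]; exact hL')
    rw [List.length_mapIdx] at this
    refine ⟨this.1, ?_⟩
    intro i hi
    rw [this.2 i hi, hdrop]
    simp only [pvZipSum]
    ring_nf

-- ===== VERDICT (by name: the statement is the Claim_ definition above) =====
theorem combinaison_lineaire_spec : Claim_equal_combinaison_lineaire := by
  intro c V p _ hpre
  obtain ⟨hV, hp, hc, hv⟩ := hpre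
  show combinaison_lineaire c V p = combinaison_lineaire_alt c V p
  unfold combinaison_lineaire combinaison_lineaire_alt
  have h0 : (List.replicate (V.headD []).length (0:Int)).length = (V.headD []).length := by simp
  have main := pvOuter p c V (List.replicate (V.headD []).length 0) 0
    (by simpa using hc)
    (by intro v hv'; rw [h0, hv v hv'])
    (fun _ => 0)
    (by intro i hi
        rw [List.getD_eq_getElem _ _ hi, List.getElem_replicate]
        show (0:Int) = Int.fmod 0 p
        simp)
  apply List.ext_getElem
  · rw [main.1, h0]; simp
  · intro i h1 h2
    have hi : i < (List.replicate (V.headD []).length (0:Int)).length := by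
      rw [← main.1]; exact h1
    rw [← List.getD_eq_getElem _ _ h1, main.2 i hi]
    rw [List.getElem_map, List.getElem_range]
    have hiV : i < (V.headD []).length := by simpa using h2
    rw [pvZipSum_fold _ _ _ _ (fun v hv' => by rw [hv v hv']; exact hiV)]
    simp
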